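-- pv_equiv track=rewrite | github.com/ep-eaglepoint-ai/bd_datasets_003 | 6jfpfv-pytest-integration-test-suite-for-rest-api-clients-with-circuit-breaker/evaluation/evaluation.py | _parse_pytest_json
-- ===== SOURCE A (Python) =====
-- def _parse_pytest_json(report_json: dict) -> tuple[list[dict], dict]:
-- 	tests: list[dict] = []
-- 	passed = failed = errors = skipped = 0
--
-- 	# pytest-json-report schema: https://pypi.org/project/pytest-json-report/
-- 	# - report_json["tests"]: list of {"nodeid", "outcome", ...}
-- 	for t in report_json.get("tests", []) or []:
-- 		nodeid = t.get("nodeid") or "unknown"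
-- 		outcome = t.get("outcome") or "unknown"
-- 		if outcome == "passed":
-- 			passed += 1
-- 		elif outcome == "failed":
-- 			failed += 1
-- 		elif outcome == "skipped":
-- 			skipped += 1
-- 		else:
-- 			errors += 1
-- 		tests.append({"nodeid": nodeid, "name": nodeid, "outcome": outcome})
--
-- 	total = len(tests)
-- 	summary = {"total": total, "passed": passed, "failed": failed, "errors": errors, "skipped": skipped}
-- 	return tests, summary
-- ===== SOURCE B (Python) =====
-- def _outcome(t):
-- 	return t.get("outcome") or "unknown"
--
--
-- def _entry(t):
-- 	nodeid = t.get("nodeid") or "unknown"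
-- 	return {"nodeid": nodeid, "name": nodeid, "outcome": _outcome(t)}
--
--
-- def _parse_pytest_json(report_json: dict) -> tuple[list[dict], dict]:
-- 	raw = report_json.get("tests", []) or []
-- 	tests = [_entry(t) for t in raw]
-- 	outcomes = [_outcome(t) for t in raw]
-- 	total = len(raw)
-- 	passed = outcomes.count("passed")
-- 	failed = outcomes.count("failed")
-- 	skipped = outcomes.count("skipped")
-- 	summary = {"total": total, "passed": passed, "failed": failed,
-- 	           "errors": total - passed - failed - skipped, "skipped": skipped}
-- 	return tests, summary
-- ===== Notes on version B (the rewrite author's own statement) =====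
-- stated objective: simpler
-- what changed: Replaces the single loop with five in-place counters by two comprehensions (entries and outcomes) plus list.count per named outcome, deriving errors by subtraction total - passed - failed - skipped.
import Mathlib
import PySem

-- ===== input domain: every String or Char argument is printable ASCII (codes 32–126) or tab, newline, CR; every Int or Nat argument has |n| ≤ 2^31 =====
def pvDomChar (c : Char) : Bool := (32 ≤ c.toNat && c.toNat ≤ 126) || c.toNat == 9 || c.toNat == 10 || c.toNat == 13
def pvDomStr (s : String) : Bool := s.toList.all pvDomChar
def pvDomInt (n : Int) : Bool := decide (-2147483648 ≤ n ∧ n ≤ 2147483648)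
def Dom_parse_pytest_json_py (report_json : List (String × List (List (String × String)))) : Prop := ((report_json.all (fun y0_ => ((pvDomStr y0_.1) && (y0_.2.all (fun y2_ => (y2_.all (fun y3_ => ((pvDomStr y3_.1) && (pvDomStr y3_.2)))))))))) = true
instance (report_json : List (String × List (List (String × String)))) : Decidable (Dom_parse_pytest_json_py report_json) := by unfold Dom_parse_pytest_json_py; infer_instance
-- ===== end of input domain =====

-- B builds the tests list and the outcome list with two maps and tallies each named
-- outcome with list.count (errors by subtraction), instead of A's single loop over
-- five in-place counters; objective: simpler decomposition, same O(n) cost.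


-- ===== PORT A =====
-- `x or "unknown"`: None and "" are falsy in Python
def pyOrStr (o : Option String) (d : String) : String :=
  match o with
  | some s => if s = "" then d else s
  | none => d

-- the body of A's for-loop, state = (tests, passed, failed, errors, skipped)
def pvStepA (acc : List (List (String × String)) × Int × Int × Int × Int)
    (t : List (String × String)) : List (List (String × String)) × Int × Int × Int × Int :=
  let nodeid := pyOrStr (t.lookup "nodeid") "unknown"
  let outcome := pyOrStr (t.lookup "outcome") "unknown"
  let counters :=
    if outcome = "passed" then (acc.2.1 + 1, acc.2.2.1, acc.2.2.2.1, acc.2.2.2.2)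
    else if outcome = "failed" then (acc.2.1, acc.2.2.1 + 1, acc.2.2.2.1, acc.2.2.2.2)
    else if outcome = "skipped" then (acc.2.1, acc.2.2.1, acc.2.2.2.1, acc.2.2.2.2 + 1)
    else (acc.2.1, acc.2.2.1, acc.2.2.2.1 + 1, acc.2.2.2.2)
  (acc.1 ++ [[("nodeid", nodeid), ("name", nodeid), ("outcome", outcome)]], counters)

def parse_pytest_json_py (report_json : List (String × List (List (String × String)))) : (List (List (String × String))) × (List (String × Int)) :=
  let raw0 := (report_json.lookup "tests").getD []       -- report_json.get("tests", [])
  let raw := if raw0 = [] then [] else raw0              -- `… or []`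
  let st := raw.foldl pvStepA ([], 0, 0, 0, 0)
  (st.1, [("total", (st.1.length : Int)), ("passed", st.2.1), ("failed", st.2.2.1),
          ("errors", st.2.2.2.1), ("skipped", st.2.2.2.2)])

-- ===== PORT B =====
def pvOutcome (t : List (String × String)) : String :=
  pyOrStr (t.lookup "outcome") "unknown"

def pvEntry (t : List (String × String)) : List (String × String) :=
  let nodeid := pyOrStr (t.lookup "nodeid") "unknown"
  [("nodeid", nodeid), ("name", nodeid), ("outcome", pvOutcome t)]

def parse_pytest_json_py_alt (report_json : List (String × List (List (String × String)))) : (List (List (String × String))) × (List (String × Int)) :=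
  let raw0 := (report_json.lookup "tests").getD []
  let raw := if raw0 = [] then [] else raw0
  let tests := raw.map pvEntry
  let outcomes := raw.map pvOutcome
  let total : Int := raw.length
  let passed : Int := outcomes.count "passed"
  let failed : Int := outcomes.count "failed"
  let skipped : Int := outcomes.count "skipped"
  (tests, [("total", total), ("passed", passed), ("failed", failed),
           ("errors", total - passed - failed - skipped), ("skipped", skipped)])

-- ===== PRECONDITION & SPEC =====
def Spec_parse_pytest_json_py (report_json : List (String × List (List (String × String)))) (out : (List (List (String × String))) × (List (String × Int))) : Prop := out = parse_pytest_json_py_alt report_json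
instance (report_json : List (String × List (List (String × String)))) (out : (List (List (String × String))) × (List (String × Int))) : Decidable (Spec_parse_pytest_json_py report_json out) := by unfold Spec_parse_pytest_json_py; infer_instance

-- ===== CLAIM (what is proved, stated in full; the proofs are below) =====
def Claim_equal_parse_pytest_json_py : Prop := ∀ (report_json : List (String × List (List (String × String)))), Dom_parse_pytest_json_py report_json → Spec_parse_pytest_json_py report_json (parse_pytest_json_py report_json)

-- ===== LEMMAS AND PROOFS =====
-- the "none of the three named outcomes" predicate (A's else branch)
def pvOther (o : String) : Bool :=
  !(o == "passed") && !(o == "failed") && !(o == "skipped")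

-- the counts of the three named outcomes plus the rest partition the list
theorem pv_count_partition (os : List String) :
    os.count "passed" + os.count "failed" + os.count "skipped" + os.countP pvOther = os.length := by
  induction os with
  | nil => simp
  | cons o os ih =>
    simp only [List.count_cons, List.countP_cons, List.length_cons, pvOther]
    by_cases h1 : o = "passed" <;> by_cases h2 : o = "failed" <;> by_cases h3 : o = "skipped" <;>
      simp [h1, h2, h3] at * <;> omega

-- characterisation of A's loop
theorem pv_foldA (raw : List (List (String × String)))
    (ts : List (List (String × String))) (p f e s : Int) :
    raw.foldl pvStepA (ts, p, f, e, s) =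
      (ts ++ raw.map pvEntry,
       p + ((raw.map pvOutcome).count "passed" : Int),
       f + ((raw.map pvOutcome).count "failed" : Int),
       e + ((raw.map pvOutcome).countP pvOther : Int),
       s + ((raw.map pvOutcome).count "skipped" : Int)) := by
  induction raw generalizing ts p f e s with
  | nil => simp
  | cons t raw ih =>
    simp only [List.foldl_cons, List.map_cons, List.count_cons, List.countP_cons]
    rw [pvStepA]
    by_cases h1 : pyOrStr (t.lookup "outcome") "unknown" = "passed" <;>
      by_cases h2 : pyOrStr (t.lookup "outcome") "unknown" = "failed" <;>
        by_cases h3 : pyOrStr (t.lookup "outcome") "unknown" = "skipped" <;>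
          simp only [h1, h2, h3, if_true, if_false, ih, pvEntry, pvOutcome, pvOther] <;>
            simp [h1, h2, h3] <;> ring_nf

-- ===== VERDICT (by name: the statement is the Claim_ definition above) =====
theorem parse_pytest_json_py_spec : Claim_equal_parse_pytest_json_py := by
  intro report_json _
  unfold Spec_parse_pytest_json_py parse_pytest_json_py parse_pytest_json_py_alt
  simp only [pv_foldA, List.nil_append, List.length_map]
  set raw0 := (report_json.lookup "tests").getD []
  set raw := if raw0 = [] then [] else raw0 with hraw
  have hpart := pv_count_partition (raw.map pvOutcome)
  simp only [List.length_map] at hpart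
  refine Prod.ext rfl ?_
  have h : ((raw.map pvOutcome).countP pvOther : Int)
      = (raw.length : Int) - ((raw.map pvOutcome).count "passed" : Int)
        - ((raw.map pvOutcome).count "failed" : Int)
        - ((raw.map pvOutcome).count "skipped" : Int) := by omega
  rw [List.countP_map] at h
  simp [h]
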